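-- pv_equiv track=rewrite | github.com/POOJANIH/10670408_Poojani_Hirani_CSP2348_A2 | bdb_sort.py | bdb_sort
-- ===== SOURCE A (Python) =====
-- def bdb_sort(arr):
--     n = len(arr)
--     comparisons = 0
--     for i in range(n//2):
--         # Left-to-right scan
--         for j in range(n-i-1):
--             comparisons += 1
--             if arr[j] > arr[j+1]:
--                 arr[j], arr[j+1] = arr[j+1], arr[j]
--         # Right-to-left scan
--         for k in range(n-i-2, i-1, -1):
--             comparisons += 1
--             if arr[k] > arr[k+1]:
--                 arr[k], arr[k+1] = arr[k+1], arr[k]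
--     return comparisons
-- ===== SOURCE B (Python) =====
-- def bdb_sort(arr):
--     # Re-implementation: the comparison count of A depends only on len(arr);
--     # sort in place with the library sort and return the closed-form count.
--     arr.sort()
--     n = len(arr)
--     m = n // 2
--     return m * (2 * n - 2) - 3 * m * (m - 1) // 2
-- ===== Notes on version B (the rewrite author's own statement) =====
-- stated objective: faster
-- what changed: Replaces the n//2-pass cocktail-sort loop and its incremented comparison counter by the library sort plus a closed-form count m*(2n-2) - 3*m*(m-1)//2 (m = n//2), since A's return value depends only on len(arr).
import Mathlib
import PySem

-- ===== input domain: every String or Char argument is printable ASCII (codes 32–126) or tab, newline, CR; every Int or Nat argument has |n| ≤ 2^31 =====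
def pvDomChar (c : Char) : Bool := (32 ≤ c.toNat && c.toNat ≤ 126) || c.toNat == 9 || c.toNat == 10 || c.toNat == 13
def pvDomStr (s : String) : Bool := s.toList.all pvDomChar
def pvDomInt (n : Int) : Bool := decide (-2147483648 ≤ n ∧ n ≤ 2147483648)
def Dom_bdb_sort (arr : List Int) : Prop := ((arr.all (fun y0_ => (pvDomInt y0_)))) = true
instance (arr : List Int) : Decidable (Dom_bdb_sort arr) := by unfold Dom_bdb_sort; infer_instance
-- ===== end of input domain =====

-- B replaces A's O(n^2) cocktail sort + counter by sorted() plus a closed-form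
-- comparison count (a function of n only). Both Pythons mutate arr in place to the
-- same fully sorted order; the equivalence proved here is about the RETURN value.

-- ===== PORT A =====
-- one comparison step of a scan: compare arr[j] and arr[j+1], swap if out of order
-- (the loop bounds of A keep j and j+1 in range, so pyGetD/pySetD are exact here)
def pvSwapStep (st : List Int × Int) (j : Int) : List Int × Int :=
  let arr := st.1
  let comparisons := st.2 + 1
  let a := PySem.List.pyGetD arr j 0
  let b := PySem.List.pyGetD arr (j + 1) 0
  if a > b then (PySem.List.pySetD (PySem.List.pySetD arr j b) (j + 1) a, comparisons)
  else (arr, comparisons)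

def bdb_sort (arr : List Int) : Int :=
  let n := PySem.List.len arr
  (((PySem.List.pyRange 0 (PySem.Int.floordiv n 2) 1).foldl
      (fun st i =>
        let st := (PySem.List.pyRange 0 (n - i - 1) 1).foldl pvSwapStep st
        (PySem.List.pyRange (n - i - 2) (i - 1) (-1)).foldl pvSwapStep st)
      (arr, (0 : Int)))).2

-- ===== PORT B =====
-- Source B sorts arr in place (return value unaffected) and returns the closed form
def bdb_sort_alt (arr : List Int) : Int :=
  let n := PySem.List.len arr
  let m := PySem.Int.floordiv n 2
  m * (2 * n - 2) - PySem.Int.floordiv (3 * m * (m - 1)) 2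

-- ===== PRECONDITION & SPEC =====
def Spec_bdb_sort (arr : List Int) (out : Int) : Prop := out = bdb_sort_alt arr
instance (arr : List Int) (out : Int) : Decidable (Spec_bdb_sort arr out) := by unfold Spec_bdb_sort; infer_instance

-- ===== CLAIM (what is proved, stated in full; the proofs are below) =====
def Claim_equal_bdb_sort : Prop := ∀ (arr : List Int), Dom_bdb_sort arr → Spec_bdb_sort arr (bdb_sort arr)

-- ===== LEMMAS AND PROOFS =====

-- the comparison count contributed by the first m outer iterations, as A sums it
def pvCnt (n : Int) (m : Nat) : Int :=
  ∑ k ∈ Finset.range m, ((((n - k - 1).toNat : Int)) + ((((n - k - 2) - ((k : Int) - 1)).toNat : Int)))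

theorem pvSwap_snd (L : List Int) (st : List Int × Int) :
    (L.foldl pvSwapStep st).2 = st.2 + L.length := by
  induction L generalizing st with
  | nil => simp
  | cons x xs ih =>
    simp only [List.foldl_cons, ih]
    simp [pvSwapStep]
    split <;> omega

theorem pvOuter_snd (n : Int) (m : Nat) (st : List Int × Int) :
    ((PySem.List.pyRange 0 (m : Int) 1).foldl
      (fun st i =>
        let st := (PySem.List.pyRange 0 (n - i - 1) 1).foldl pvSwapStep st
        (PySem.List.pyRange (n - i - 2) (i - 1) (-1)).foldl pvSwapStep st) st).2
    = st.2 + pvCnt n m := by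
  induction m generalizing st with
  | zero => simp [pvCnt, PySem.List.pyRange_zero]
  | succ m ih =>
    have hcast : ((m + 1 : Nat) : Int) = (m : Int) + 1 := by push_cast; ring
    rw [hcast, PySem.List.pyRange_one_succ_right (by positivity), List.foldl_append]
    simp only [List.foldl_cons, List.foldl_nil]
    rw [pvSwap_snd, pvSwap_snd, ih]
    simp [pvCnt, Finset.sum_range_succ, PySem.List.length_pyRange_one,
      PySem.List.length_pyRange_neg_one]
    ring

theorem pvCnt_closed (N : Nat) (m : Nat) (hm : 2 * m ≤ N) :
    2 * pvCnt (N : Int) m = (m : Int) * (4 * N - 4) - 3 * m * (m - 1) := by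
  induction m with
  | zero => simp [pvCnt]
  | succ m ih =>
    have h1 : ((((N : Int) - m - 1).toNat : Int)) = (N : Int) - m - 1 := by
      rw [Int.toNat_of_nonneg]; omega
    have h2 : (((((N : Int) - m - 2) - ((m : Int) - 1)).toNat : Int)) = (N : Int) - 2 * m - 1 := by
      rw [Int.toNat_of_nonneg] <;> omega
    have ih' := ih (by omega)
    rw [pvCnt, Finset.sum_range_succ, ← pvCnt, h1, h2]
    push_cast [mul_add] at ih' ⊢
    linarith [ih']

-- ===== VERDICT (by name: the statement is the Claim_ definition above) =====
theorem bdb_sort_spec : Claim_equal_bdb_sort := by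
  intro arr _
  unfold Spec_bdb_sort bdb_sort bdb_sort_alt
  simp only [PySem.List.len_eq]
  have hfd : PySem.Int.floordiv (arr.length : Int) 2 = ((arr.length / 2 : Nat) : Int) := by
    exact_mod_cast PySem.Int.floordiv_natCast arr.length 2
  rw [hfd, pvOuter_snd (arr.length : Int) (arr.length / 2) (arr, 0)]
  have hc := pvCnt_closed arr.length (arr.length / 2) (by omega)
  have hdvd : (2 : Int) ∣ ((arr.length / 2 : Nat) : Int) * (((arr.length / 2 : Nat) : Int) - 1) := by
    rcases Int.even_mul_succ_self (((arr.length / 2 : Nat) : Int) - 1) with ⟨c, hcq⟩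
    exact ⟨c, by linarith [hcq]⟩
  set M : Int := ((arr.length / 2 : Nat) : Int) with hM
  set N : Int := (arr.length : Int) with hN
  rw [PySem.Int.floordiv_eq_ediv_of_pos (by norm_num)]
  have e3 : 3 * M * (M - 1) = 3 * (M * (M - 1)) := by ring
  rw [e3]
  have e4 : M * (2 * N - 2) = 2 * (M * (N - 1)) := by ring
  rw [e4]
  have hc' : 2 * pvCnt N (arr.length / 2) = 4 * (M * (N - 1)) - 3 * (M * (M - 1)) := by
    rw [hc]; ring
  generalize hq : M * (N - 1) = q at *
  generalize hp : M * (M - 1) = p at *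
  omega
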